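-- pv_equiv track=rewrite | github.com/sineretsony/ITSTEP | 022hw.py | maximum_minimum
-- ===== SOURCE A (Python) =====
-- def maximum_minimum(d):
--     max_g = max(d, key=lambda x: x[2])[2]
--     min_g = min(d, key=lambda x: x[2])[2]
--
--     temp_max = []
--     temp_min = []
--
--     for s in d:
--         if s[2] == max_g:
--             temp_max.append(", ".join(str(i) for i in s))
--         elif s[2] == min_g:
--             temp_min.append(", ".join(str(i) for i in s))
--
--     return "\n".join(temp_max) + "\n" + "\n".join(temp_min)
-- ===== SOURCE B (Python) =====
-- def maximum_minimum(d):
--     groups = {}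
--     for s in d:
--         groups.setdefault(s[2], []).append(", ".join(str(i) for i in s))
--     max_g = max(groups)
--     min_g = min(groups)
--     temp_min = [] if min_g == max_g else groups[min_g]
--     return "\n".join(groups[max_g]) + "\n" + "\n".join(temp_min)
-- ===== Notes on version B (the rewrite author's own statement) =====
-- stated objective: simpler
-- what changed: B builds one dict grouping formatted rows by their third field, then just looks up the max and min keys, replacing A's two extremum scans plus an if/elif filtering loop.
-- outside the precondition, e.g. on maximum_minimum([]): A raises ValueError, B raises ValueError
import Mathlib
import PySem

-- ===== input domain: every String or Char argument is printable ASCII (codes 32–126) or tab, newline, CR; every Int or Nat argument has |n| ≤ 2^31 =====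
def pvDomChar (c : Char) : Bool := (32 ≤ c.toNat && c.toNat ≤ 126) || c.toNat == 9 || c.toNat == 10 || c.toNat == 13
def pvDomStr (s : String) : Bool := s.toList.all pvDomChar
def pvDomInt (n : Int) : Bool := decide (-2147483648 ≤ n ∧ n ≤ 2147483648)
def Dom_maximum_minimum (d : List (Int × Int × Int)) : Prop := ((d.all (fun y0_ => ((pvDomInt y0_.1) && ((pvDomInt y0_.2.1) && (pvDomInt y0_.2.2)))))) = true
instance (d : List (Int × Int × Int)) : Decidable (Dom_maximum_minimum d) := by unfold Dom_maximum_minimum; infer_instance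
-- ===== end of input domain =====

-- B groups rows in one dict pass keyed by the third field, then looks up the max/min keys,
-- replacing A's two extremum scans plus a filtering loop; objective: simpler, same cost.


-- ===== PORT A =====
-- ", ".join(str(i) for i in s)
def mmFmt (s : Int × Int × Int) : String :=
  PySem.Str.join ", " [PySem.Int.toStr s.1, PySem.Int.toStr s.2.1, PySem.Int.toStr s.2.2]

def maximum_minimum (d : List (Int × Int × Int)) : String :=
  match PySem.List.max? d (fun x => x.2.2), PySem.List.min? d (fun x => x.2.2) with
  | some mx, some mn =>
    let max_g := mx.2.2
    let min_g := mn.2.2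
    let r := d.foldl (fun (acc : List String × List String) s =>
      if s.2.2 = max_g then (acc.1 ++ [mmFmt s], acc.2)
      else if s.2.2 = min_g then (acc.1, acc.2 ++ [mmFmt s])
      else acc) ([], [])
    PySem.Str.join "\n" r.1 ++ "\n" ++ PySem.Str.join "\n" r.2
  | _, _ => ""  -- max() of empty sequence raises ValueError: outside Pre_

-- ===== PORT B =====
-- ", ".join(str(i) for i in s)  (B's copy of the row formatter)
def mmFmtB (s : Int × Int × Int) : String :=
  PySem.Str.join ", " [PySem.Int.toStr s.1, PySem.Int.toStr s.2.1, PySem.Int.toStr s.2.2]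

def maximum_minimum_alt (d : List (Int × Int × Int)) : String :=
  let groups := d.foldl (fun (g : PySem.Dict Int (List String)) s =>
      g.modify s.2.2 [] (· ++ [mmFmtB s])) PySem.Dict.empty
  match PySem.List.max? groups.keys (fun k => k) with
  | none => ""  -- max() of an empty dict raises ValueError: outside Pre_
  | some max_g =>
    match PySem.List.min? groups.keys (fun k => k) with
    | none => ""
    | some min_g =>
      let temp_min := if min_g == max_g then [] else groups.getD min_g []
      PySem.Str.join "\n" (groups.getD max_g []) ++ "\n" ++ PySem.Str.join "\n" temp_min

-- ===== PRECONDITION & SPEC =====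
-- Python A raises ValueError (max of empty sequence) on d = []; so does B.
def Pre_maximum_minimum (d : List (Int × Int × Int)) : Prop := d ≠ []
instance (d : List (Int × Int × Int)) : Decidable (Pre_maximum_minimum d) := by unfold Pre_maximum_minimum; infer_instance
def pvWitness_maximum_minimum : (List (Int × Int × Int)) := [(1, 2, 3), (4, 5, 6), (7, 8, 3)]
def Spec_maximum_minimum (d : List (Int × Int × Int)) (out : String) : Prop := out = maximum_minimum_alt d
instance (d : List (Int × Int × Int)) (out : String) : Decidable (Spec_maximum_minimum d out) := by unfold Spec_maximum_minimum; infer_instance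

-- ===== CLAIM (what is proved, stated in full; the proofs are below) =====
def Claim_equal_maximum_minimum : Prop := ∀ (d : List (Int × Int × Int)), Dom_maximum_minimum d → Pre_maximum_minimum d → Spec_maximum_minimum d (maximum_minimum d)

-- ===== LEMMAS AND PROOFS =====

theorem mmFmt_eq_mmFmtB : mmFmt = mmFmtB := rfl

-- A's loop produces the two filtered lists.
theorem mm_loopA (f : Int × Int × Int → String) (M m : Int) (l : List (Int × Int × Int)) (a1 a2 : List String) :
    l.foldl (fun (acc : List String × List String) s =>
      if s.2.2 = M then (acc.1 ++ [f s], acc.2)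
      else if s.2.2 = m then (acc.1, acc.2 ++ [f s])
      else acc) (a1, a2)
    = (a1 ++ (l.filter (fun s => s.2.2 == M)).map f,
       a2 ++ (l.filter (fun s => !(s.2.2 == M) && (s.2.2 == m))).map f) := by
  induction l generalizing a1 a2 with
  | nil => simp
  | cons x t ih =>
    by_cases hM : x.2.2 = M
    · simp [hM, ih]
    · by_cases hm : x.2.2 = m
      · have hmM : ¬ m = M := by rw [← hm]; exact hM
        simp [hm, hmM, ih]
      · simp [hM, hm, ih]

-- B's grouped lists are the filtered lists.
theorem mm_groupB (d : List (Int × Int × Int)) (c : Int) :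
    (d.foldl (fun (g : PySem.Dict Int (List String)) s =>
      g.modify s.2.2 [] (· ++ [mmFmtB s])) PySem.Dict.empty).getD c []
    = (d.filter (fun s => s.2.2 == c)).map mmFmtB := by
  have h := PySem.Dict.getD_foldl_modify_append
      (l := d.map (fun s => (s.2.2, mmFmtB s))) (d := PySem.Dict.empty) (c := c)
  rw [List.foldl_map] at h
  simpa [List.filter_map, Function.comp_def] using h

theorem mm_keys (d : List (Int × Int × Int)) (k : Int) :
    k ∈ (d.foldl (fun (g : PySem.Dict Int (List String)) s =>
      g.modify s.2.2 [] (· ++ [mmFmtB s])) PySem.Dict.empty).keys ↔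
    k ∈ d.map (fun s => s.2.2) := by
  rw [PySem.Dict.keys_foldl_modify_key]
  simp [PySem.Dict.keys_empty, PySem.Set.update_eq_append_filter, PySem.Set.mem_ofList]

theorem maximum_minimum_spec : Claim_equal_maximum_minimum := by
  intro d _ hne
  unfold Spec_maximum_minimum maximum_minimum maximum_minimum_alt
  obtain ⟨mx, hmx⟩ : ∃ mx, PySem.List.max? d (fun x => x.2.2) = some mx := by
    cases h : PySem.List.max? d (fun x => x.2.2) with
    | none => exact absurd ((PySem.List.max?_eq_none_iff _ _).mp h) hne
    | some m => exact ⟨m, rfl⟩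
  obtain ⟨mn, hmn⟩ : ∃ mn, PySem.List.min? d (fun x => x.2.2) = some mn := by
    cases h : PySem.List.min? d (fun x => x.2.2) with
    | none => exact absurd ((PySem.List.min?_eq_none_iff _ _).mp h) hne
    | some m => exact ⟨m, rfl⟩
  have hmxmem : mx.2.2 ∈ (d.foldl (fun (g : PySem.Dict Int (List String)) s =>
      g.modify s.2.2 [] (· ++ [mmFmtB s])) PySem.Dict.empty).keys := by
    rw [mm_keys]; exact List.mem_map_of_mem (PySem.List.max?_mem hmx)
  obtain ⟨K, hK⟩ : ∃ K, PySem.List.max? (d.foldl (fun (g : PySem.Dict Int (List String)) s =>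
      g.modify s.2.2 [] (· ++ [mmFmtB s])) PySem.Dict.empty).keys (fun k => k) = some K := by
    cases h : PySem.List.max? (d.foldl (fun (g : PySem.Dict Int (List String)) s =>
      g.modify s.2.2 [] (· ++ [mmFmtB s])) PySem.Dict.empty).keys (fun k => k) with
    | none => rw [PySem.List.max?_eq_none_iff _ _] at h; rw [h] at hmxmem; cases hmxmem
    | some m => exact ⟨m, rfl⟩
  obtain ⟨k0, hk0⟩ : ∃ k0, PySem.List.min? (d.foldl (fun (g : PySem.Dict Int (List String)) s =>
      g.modify s.2.2 [] (· ++ [mmFmtB s])) PySem.Dict.empty).keys (fun k => k) = some k0 := by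
    cases h : PySem.List.min? (d.foldl (fun (g : PySem.Dict Int (List String)) s =>
      g.modify s.2.2 [] (· ++ [mmFmtB s])) PySem.Dict.empty).keys (fun k => k) with
    | none => rw [PySem.List.min?_eq_none_iff _ _] at h; rw [h] at hmxmem; cases hmxmem
    | some m => exact ⟨m, rfl⟩
  have hKeq : K = mx.2.2 := by
    have h1 : K ≤ mx.2.2 := by
      have hKmem := PySem.List.max?_mem hK
      rw [mm_keys] at hKmem
      obtain ⟨s, hs, hsk⟩ := List.mem_map.mp hKmem
      exact hsk ▸ PySem.List.max?_isMax hmx s hs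
    have h2 : mx.2.2 ≤ K := PySem.List.max?_isMax hK _ hmxmem
    omega
  have hmnmem : mn.2.2 ∈ (d.foldl (fun (g : PySem.Dict Int (List String)) s =>
      g.modify s.2.2 [] (· ++ [mmFmtB s])) PySem.Dict.empty).keys := by
    rw [mm_keys]; exact List.mem_map_of_mem (PySem.List.min?_mem hmn)
  have hkeq : k0 = mn.2.2 := by
    have h1 : mn.2.2 ≤ k0 := by
      have hkmem := PySem.List.min?_mem hk0
      rw [mm_keys] at hkmem
      obtain ⟨s, hs, hsk⟩ := List.mem_map.mp hkmem
      exact hsk ▸ PySem.List.min?_isMin hmn s hs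
    have h2 : k0 ≤ mn.2.2 := PySem.List.min?_isMin hk0 _ hmnmem
    omega
  simp only [hmx, hmn, hK, hk0, mm_loopA, mm_groupB, mmFmt_eq_mmFmtB, List.nil_append, hKeq, hkeq]
  by_cases heq : mn.2.2 = mx.2.2
  · simp [heq]
  · have hfil : (d.filter (fun s => !(s.2.2 == mx.2.2) && (s.2.2 == mn.2.2)))
        = d.filter (fun s => s.2.2 == mn.2.2) := by
      apply List.filter_congr; intro s _
      by_cases h : s.2.2 = mn.2.2 <;> simp [h, heq]
    simp [heq, hfil]
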